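-- pv_equiv track=rewrite | github.com/Wendystar0628/Circuit-Design-AI-Assistant | presentation/panels/simulation/chart_axis_planner.py | _compose_axis_label
-- ===== SOURCE A (Python) =====
-- from typing import Dict, Iterable, List, Optional, Sequence, Set
--
-- _FAMILY_LABELS: Dict[str, str] = {
--     "voltage": "Voltage (V)",
--     "current": "Current (A)",
--     "other": "Signal Value",
--     "noise_voltage_density": "Voltage Noise Density (V/√Hz)",
--     "noise_current_density": "Current Noise Density (A/√Hz)",
--     "noise_other_density": "Noise Spectral Density",
--     "magnitude_db": "Magnitude (dB)",
--     "phase_deg": "Phase (°)",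
-- }
--
-- _FAMILY_PRIORITY: Dict[str, int] = {
--     "voltage": 0,
--     "noise_voltage_density": 0,
--     "magnitude_db": 0,
--     "current": 1,
--     "noise_current_density": 1,
--     "phase_deg": 1,
--     "other": 2,
--     "noise_other_density": 2,
-- }
--
-- _DEFAULT_FAMILY = "other"
--
-- _DEFAULT_AXIS_LABEL = _FAMILY_LABELS[_DEFAULT_FAMILY]
--
-- def _normalize_family(value: str) -> str:
--     candidate = str(value or "").strip().lower()
--     if candidate in _FAMILY_LABELS:
--         return candidate
--     return _DEFAULT_FAMILY
--
-- def _compose_axis_label(families: Iterable[str]) -> str: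
--     ordered = sorted(
--         {_normalize_family(family) for family in families},
--         key=lambda family: (_FAMILY_PRIORITY.get(family, 99), _FAMILY_LABELS.get(family, _DEFAULT_AXIS_LABEL)),
--     )
--     if not ordered:
--         return _DEFAULT_AXIS_LABEL
--     if len(ordered) == 1:
--         return _FAMILY_LABELS.get(ordered[0], _DEFAULT_AXIS_LABEL)
--     return " / ".join(_FAMILY_LABELS.get(family, _DEFAULT_AXIS_LABEL) for family in ordered)
-- ===== SOURCE B (Python) =====
-- _FAMILY_LABELS = {
--     "voltage": "Voltage (V)",
--     "current": "Current (A)",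
--     "other": "Signal Value",
--     "noise_voltage_density": "Voltage Noise Density (V/√Hz)",
--     "noise_current_density": "Current Noise Density (A/√Hz)",
--     "noise_other_density": "Noise Spectral Density",
--     "magnitude_db": "Magnitude (dB)",
--     "phase_deg": "Phase (°)",
-- }
--
-- _DEFAULT_FAMILY = "other"
-- _DEFAULT_AXIS_LABEL = _FAMILY_LABELS[_DEFAULT_FAMILY]
--
-- # All known family keys, sorted once at module load by (priority, label).
-- _ORDERED_FAMILIES = (
--     "magnitude_db",
--     "voltage",
--     "noise_voltage_density",
--     "current",
--     "noise_current_density",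
--     "phase_deg",
--     "noise_other_density",
--     "other",
-- )
--
-- def _normalize_family(value):
--     candidate = str(value or "").strip().lower()
--     if candidate in _FAMILY_LABELS:
--         return candidate
--     return _DEFAULT_FAMILY
--
-- def _compose_axis_label(families):
--     present = {_normalize_family(family) for family in families}
--     labels = [_FAMILY_LABELS[key] for key in _ORDERED_FAMILIES if key in present]
--     return " / ".join(labels) if labels else _DEFAULT_AXIS_LABEL
-- ===== Notes on version B (the rewrite author's own statement) =====
-- stated objective: simpler
-- what changed: B precomputes the module-level family order once (a fixed tuple sorted by (priority, label)) and composes the label by a single filtering pass over it against the normalized presence set, removing the per-call sort and the separate single-element branch.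
import Mathlib
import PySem

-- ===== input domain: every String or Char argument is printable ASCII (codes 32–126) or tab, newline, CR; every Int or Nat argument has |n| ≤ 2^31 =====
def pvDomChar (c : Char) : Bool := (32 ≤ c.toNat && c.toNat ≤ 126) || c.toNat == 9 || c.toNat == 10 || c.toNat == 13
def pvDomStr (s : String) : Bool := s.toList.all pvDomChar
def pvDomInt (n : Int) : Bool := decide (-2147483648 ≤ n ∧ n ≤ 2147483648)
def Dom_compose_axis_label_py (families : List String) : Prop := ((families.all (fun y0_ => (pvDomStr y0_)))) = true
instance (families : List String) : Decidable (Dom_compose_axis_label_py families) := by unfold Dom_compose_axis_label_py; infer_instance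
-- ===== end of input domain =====

-- B replaces the per-call sort by a precomputed fixed family order filtered by the presence set (objective: simpler).

-- ===== PORT A =====
def famLabels : PySem.Dict String String := PySem.Dict.ofList
  [("voltage", "Voltage (V)"), ("current", "Current (A)"), ("other", "Signal Value"),
   ("noise_voltage_density", "Voltage Noise Density (V/√Hz)"),
   ("noise_current_density", "Current Noise Density (A/√Hz)"),
   ("noise_other_density", "Noise Spectral Density"),
   ("magnitude_db", "Magnitude (dB)"), ("phase_deg", "Phase (°)")]

def famPriority : PySem.Dict String Int := PySem.Dict.ofList
  [("voltage", 0), ("noise_voltage_density", 0), ("magnitude_db", 0),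
   ("current", 1), ("noise_current_density", 1), ("phase_deg", 1),
   ("other", 2), ("noise_other_density", 2)]

def defaultFamily : String := "other"

def defaultAxisLabel : String := PySem.Dict.getD famLabels defaultFamily ""

def normalizeFamily (value : String) : String :=
  let candidate := PySem.Str.lower (PySem.Str.strip (if value = "" then "" else value))
  if PySem.Dict.contains famLabels candidate then candidate else defaultFamily

def compose_axis_label_py (families : List String) : String :=
  let ordered := PySem.List.sorted2 (PySem.Set.ofList (families.map normalizeFamily))
    (fun family => PySem.Dict.getD famPriority family 99)
    (fun family => PySem.Dict.getD famLabels family defaultAxisLabel)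
  if ordered = [] then defaultAxisLabel
  else if ordered.length = 1 then
    PySem.Dict.getD famLabels ((PySem.List.pyGet? ordered 0).getD "") defaultAxisLabel
  else
    PySem.Str.join " / " (ordered.map (fun family => PySem.Dict.getD famLabels family defaultAxisLabel))

-- ===== PORT B =====
-- all known family keys, in the fixed (priority, label) order, computed once
def orderedFamilies : List String :=
  ["magnitude_db", "voltage", "noise_voltage_density",
   "current", "noise_current_density", "phase_deg",
   "noise_other_density", "other"]

def compose_axis_label_py_alt (families : List String) : String :=
  let present : PySem.Set String := PySem.Set.ofList (families.map normalizeFamily)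
  let labels := (orderedFamilies.filter (fun key => PySem.Set.contains present key)).map
    (fun key => PySem.Dict.getD famLabels key "")
  if labels = [] then defaultAxisLabel else PySem.Str.join " / " labels

-- ===== PRECONDITION & SPEC =====
def Spec_compose_axis_label_py (families : List String) (out : String) : Prop := out = compose_axis_label_py_alt families
instance (families : List String) (out : String) : Decidable (Spec_compose_axis_label_py families out) := by unfold Spec_compose_axis_label_py; infer_instance

-- ===== CLAIM (what is proved, stated in full; the proofs are below) =====
def Claim_equal_compose_axis_label_py : Prop := ∀ (families : List String), Dom_compose_axis_label_py families → Spec_compose_axis_label_py families (compose_axis_label_py families)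

-- ===== LEMMAS AND PROOFS =====

-- every key of the labels dict is in the fixed order
theorem contains_mem (c : String) (h : PySem.Dict.contains famLabels c = true) :
    c ∈ orderedFamilies := by
  rw [PySem.Dict.contains_eq_decide_mem_keys] at h
  have h2 : c ∈ famLabels.keys := of_decide_eq_true h
  have hk : famLabels.keys = ["voltage", "current", "other", "noise_voltage_density",
      "noise_current_density", "noise_other_density", "magnitude_db", "phase_deg"] := by rfl
  rw [hk] at h2
  fin_cases h2 <;> decide

-- normalize always lands in the 8 known keys
theorem normalize_mem (v : String) : normalizeFamily v ∈ orderedFamilies := by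
  unfold normalizeFamily
  by_cases h : PySem.Dict.contains famLabels
      (PySem.Str.lower (PySem.Str.strip (if v = "" then "" else v))) = true
  · rw [if_pos h]
    exact contains_mem _ h
  · rw [if_neg h]
    decide

theorem insertBy_congr {α : Type} (f g : α → α → Bool) (h : ∀ a b, f a b = g a b)
    (x : α) (l : List α) : PySem.List.insertBy f x l = PySem.List.insertBy g x l := by
  induction l with
  | nil => rfl
  | cons y ys ih => simp [PySem.List.insertBy, h, ih]

-- sorted2 with the tuple key equals sorted with the lexicographic key
theorem sorted2_eq_sorted_lex (xs : List String) :
    PySem.List.sorted2 xs (fun f => PySem.Dict.getD famPriority f 99)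
      (fun f => PySem.Dict.getD famLabels f defaultAxisLabel) =
    PySem.List.sorted xs (fun f => toLex ((PySem.Dict.getD famPriority f 99),
      (PySem.Dict.getD famLabels f defaultAxisLabel))) := by
  rw [PySem.List.sorted_eq_foldl_insertBy]
  unfold PySem.List.sorted2
  simp only [if_neg (by decide : ¬ (false = true))]
  have hf : ∀ a b : String,
      (decide (PySem.Dict.getD famPriority a 99 < PySem.Dict.getD famPriority b 99) ||
        (!decide (PySem.Dict.getD famPriority b 99 < PySem.Dict.getD famPriority a 99) &&
          decide (PySem.Dict.getD famLabels a defaultAxisLabel <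
            PySem.Dict.getD famLabels b defaultAxisLabel))) =
      decide (toLex ((PySem.Dict.getD famPriority a 99), (PySem.Dict.getD famLabels a defaultAxisLabel)) <
        toLex ((PySem.Dict.getD famPriority b 99), (PySem.Dict.getD famLabels b defaultAxisLabel))) := by
    intro a b
    rcases lt_trichotomy (PySem.Dict.getD famPriority a 99) (PySem.Dict.getD famPriority b 99) with h | h | h
    · simp [Prod.Lex.lt_iff, h]
    · simp [Prod.Lex.lt_iff, h]
    · simp [Prod.Lex.lt_iff, h, lt_asymm h, h.ne']
  have hfun : (fun (acc : List String) x =>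
      PySem.List.insertBy (fun a b =>
        decide (PySem.Dict.getD famPriority a 99 < PySem.Dict.getD famPriority b 99) ||
        (!decide (PySem.Dict.getD famPriority b 99 < PySem.Dict.getD famPriority a 99) &&
          decide (PySem.Dict.getD famLabels a defaultAxisLabel <
            PySem.Dict.getD famLabels b defaultAxisLabel))) x acc) =
      (fun (acc : List String) x =>
      PySem.List.insertBy (fun a b =>
        decide (toLex ((PySem.Dict.getD famPriority a 99), (PySem.Dict.getD famLabels a defaultAxisLabel)) <
          toLex ((PySem.Dict.getD famPriority b 99), (PySem.Dict.getD famLabels b defaultAxisLabel)))) x acc) := by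
    funext acc x
    exact insertBy_congr _ _ hf x acc
  rw [hfun]

-- the sorted set is exactly the fixed order filtered by membership
theorem sorted_eq_filter (S : List String) (hnd : S.Nodup)
    (hmem : ∀ x ∈ S, x ∈ orderedFamilies) :
    PySem.List.sorted S (fun f => toLex ((PySem.Dict.getD famPriority f 99),
      (PySem.Dict.getD famLabels f defaultAxisLabel))) =
    orderedFamilies.filter (fun k => PySem.Set.contains S k) := by
  apply PySem.List.sorted_eq_of_perm_of_pairwise_lt
  · rw [List.perm_ext_iff_of_nodup (List.Nodup.filter _ (by decide)) hnd]
    intro a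
    simp only [List.mem_filter, PySem.Set.contains_iff]
    exact ⟨fun h => h.2, fun h => ⟨hmem a h, h⟩⟩
  · have hp : List.Pairwise (fun a b =>
        toLex ((PySem.Dict.getD famPriority a 99), (PySem.Dict.getD famLabels a defaultAxisLabel)) <
        toLex ((PySem.Dict.getD famPriority b 99), (PySem.Dict.getD famLabels b defaultAxisLabel)))
        orderedFamilies := by
      simp only [Prod.Lex.lt_iff, ofLex_toLex, String.lt_iff_toList_lt]
      decide
    exact List.Pairwise.sublist List.filter_sublist hp

-- lookups on known keys do not depend on the default
theorem getD_known (x : String) (hx : x ∈ orderedFamilies) (d : String) :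
    PySem.Dict.getD famLabels x d = PySem.Dict.getD famLabels x "" := by
  fin_cases hx <;> rfl

theorem str_join_singleton (sep l : String) : PySem.Str.join sep [l] = l := by
  have h := PySem.Str.toList_join sep [l]
  rw [List.map_cons, List.map_nil, PySem.Chars.join_singleton] at h
  exact String.ext h

-- ===== VERDICT (by name: the statement is the Claim_ definition above) =====
theorem compose_axis_label_py_spec : Claim_equal_compose_axis_label_py := by
  intro families _
  unfold Spec_compose_axis_label_py compose_axis_label_py compose_axis_label_py_alt
  dsimp only
  set S := PySem.Set.ofList (families.map normalizeFamily) with hS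
  have hnd : S.Nodup := PySem.Set.nodup_ofList _
  have hmem : ∀ x ∈ S, x ∈ orderedFamilies := by
    intro x hx
    rw [hS, PySem.Set.mem_ofList] at hx
    obtain ⟨v, _, rfl⟩ := List.mem_map.mp hx
    exact normalize_mem v
  rw [sorted2_eq_sorted_lex, sorted_eq_filter S hnd hmem]
  have hsub : ∀ x ∈ orderedFamilies.filter (fun k => PySem.Set.contains S k),
      x ∈ orderedFamilies := fun x hx => List.mem_of_mem_filter hx
  cases hF : orderedFamilies.filter (fun k => PySem.Set.contains S k) with
  | nil => simp
  | cons x rest =>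
    cases rest with
    | nil =>
      have hx : x ∈ orderedFamilies := hsub x (by rw [hF]; exact List.mem_cons_self)
      have hg : (PySem.List.pyGet? [x] (0 : Int)).getD "" = x := rfl
      simp only [List.cons_ne_nil, if_false, List.length_cons, List.length_nil,
        List.map_cons, List.map_nil, hg, if_true]
      rw [str_join_singleton]
      exact getD_known x hx _
    | cons y rest2 =>
      simp only [List.cons_ne_nil, if_false, List.length_cons]
      rw [if_neg (by simp), if_neg (by simp)]
      congr 1
      apply List.map_congr_left
      intro a ha
      exact getD_known a (hsub a (by rw [hF]; exact ha)) _
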